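-- pv_equiv track=rewrite | github.com/mabo1215/COREY_Transformer | src/experiments/run_mixed_regime_discovery.py | _repeat_to_words
-- ===== SOURCE A (Python) =====
-- def _repeat_to_words(text: str, target_words: int) -> str:
--     words = text.split()
--     if not words:
--         return text
--     out: list[str] = []
--     while len(out) < target_words:
--         out.extend(words)
--     return " ".join(out[:target_words])
-- ===== SOURCE B (Python) =====
-- def _repeat_to_words(text: str, target_words: int) -> str:
--     words = text.split()
--     if not words:
--         return text
--     if target_words <= 0:
--         return ""
--     full, rem = divmod(target_words, len(words))
--     return " ".join(words * full + words[:rem])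
-- ===== Notes on version B (the rewrite author's own statement) =====
-- stated objective: simpler
-- what changed: Replaces the grow-until-long-enough loop with a closed-form divmod: full copies of the word list plus a prefix of the remainder, joined once.
import Mathlib
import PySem

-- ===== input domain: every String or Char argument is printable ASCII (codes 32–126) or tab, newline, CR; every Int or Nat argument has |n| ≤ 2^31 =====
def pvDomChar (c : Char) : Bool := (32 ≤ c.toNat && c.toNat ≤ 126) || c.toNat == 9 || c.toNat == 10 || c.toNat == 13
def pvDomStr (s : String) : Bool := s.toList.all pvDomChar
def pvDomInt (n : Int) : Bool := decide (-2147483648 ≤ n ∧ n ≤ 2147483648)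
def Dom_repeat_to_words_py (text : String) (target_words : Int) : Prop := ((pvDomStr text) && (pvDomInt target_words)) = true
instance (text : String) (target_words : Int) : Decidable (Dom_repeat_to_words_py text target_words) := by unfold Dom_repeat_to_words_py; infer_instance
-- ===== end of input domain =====

-- B replaces A's grow-until-long-enough while loop by a closed-form divmod (full copies + prefix); objective: simpler.

-- ===== PORT A =====
-- the 'while len(out) < target_words: out.extend(words)' loop; only reached with words ≠ []
def pvALoop (words : List String) (hw : words ≠ []) (target : Int) (out : List String) : List String :=
  if (out.length : Int) < target then pvALoop words hw target (out ++ words) else out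
termination_by (target - out.length).toNat
decreasing_by
  have hL : 0 < words.length := List.length_pos_of_ne_nil hw
  simp only [List.length_append]
  omega

def repeat_to_words_py (text : String) (target_words : Int) : String :=
  let words := PySem.Str.split₀ text
  if h : words = [] then text
  else PySem.Str.join " " (PySem.List.slice (pvALoop words h target_words []) none (some target_words))

-- ===== PORT B =====
def repeat_to_words_py_alt (text : String) (target_words : Int) : String :=
  let words := PySem.Str.split₀ text
  if words = [] then text
  else if target_words ≤ 0 then ""
  else
    let full := PySem.Int.floordiv target_words (words.length : Int)
    let rem := PySem.Int.mod target_words (words.length : Int)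
    PySem.Str.join " " ((List.replicate full.toNat words).flatten ++ PySem.List.slice words none (some rem))

-- ===== PRECONDITION & SPEC =====
def Spec_repeat_to_words_py (text : String) (target_words : Int) (out : String) : Prop := out = repeat_to_words_py_alt text target_words
instance (text : String) (target_words : Int) (out : String) : Decidable (Spec_repeat_to_words_py text target_words out) := by unfold Spec_repeat_to_words_py; infer_instance

-- ===== CLAIM (what is proved, stated in full; the proofs are below) =====
def Claim_equal_repeat_to_words_py : Prop := ∀ (text : String) (target_words : Int), Dom_repeat_to_words_py text target_words → Spec_repeat_to_words_py text target_words (repeat_to_words_py text target_words)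

-- ===== LEMMAS AND PROOFS =====

-- number of loop iterations A performs to cover m more words, chunks of size L
def pvIters (L : Nat) (m : Int) : Nat := if m ≤ 0 then 0 else (m.toNat + L - 1) / L

lemma pvIters_step (L : Nat) (hL : 0 < L) (m : Int) (hm : 0 < m) :
    pvIters L m = pvIters L (m - L) + 1 := by
  unfold pvIters
  rw [if_neg (by omega : ¬ m ≤ 0)]
  by_cases h : m - (L : Int) ≤ 0
  · rw [if_pos h]
    have h1 : (m.toNat + L - 1) / L = 1 := Nat.div_eq_of_lt_le (by omega) (by omega)
    omega
  · rw [if_neg h]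
    have he : m.toNat + L - 1 = ((m - L).toNat + L - 1) + L := by omega
    rw [he, Nat.add_div_right _ hL]

lemma pvALoop_eq (words : List String) (hw : words ≠ []) (t : Int) :
    ∀ (n : Nat) (out : List String), (t - out.length).toNat ≤ n →
      pvALoop words hw t out = out ++ (List.replicate (pvIters words.length (t - out.length)) words).flatten := by
  have hL : 0 < words.length := List.length_pos_of_ne_nil hw
  intro n
  induction n with
  | zero =>
    intro out hn
    rw [pvALoop]
    have hc : ¬ ((out.length : Int) < t) := by omega
    have : pvIters words.length (t - out.length) = 0 := by unfold pvIters; simp [show t - (out.length : Int) ≤ 0 by omega]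
    simp [hc, this]
  | succ n ih =>
    intro out hn
    rw [pvALoop]
    by_cases hc : (out.length : Int) < t
    · simp only [hc, if_pos]
      rw [ih (out ++ words) (by simp only [List.length_append]; omega)]
      rw [pvIters_step words.length hL (t - out.length) (by omega)]
      simp only [List.length_append, List.replicate_succ, List.flatten_cons, List.append_assoc]
      congr 2
      push_cast
      ring_nf
    · simp only [hc, if_neg, not_false_iff]
      have : pvIters words.length (t - out.length) = 0 := by unfold pvIters; simp [show t - (out.length : Int) ≤ 0 by omega]
      simp [this]

lemma pvTake_flatten_replicate {α : Type} (ws : List α) (q r : Nat) (hr : r < ws.length) :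
    ∀ (k : Nat), q * ws.length + r ≤ k * ws.length →
      ((List.replicate k ws).flatten).take (q * ws.length + r) = (List.replicate q ws).flatten ++ ws.take r := by
  induction q with
  | zero =>
    intro k hk
    cases k with
    | zero => simp at hk; simp [hk]
    | succ k =>
      simp only [List.flatten_cons, Nat.zero_mul, Nat.zero_add,
        List.replicate, List.flatten_nil, List.nil_append]
      rw [List.take_append]
      have : r - ws.length = 0 := by omega
      simp [this]
  | succ q ih =>
    intro k hk
    cases k with
    | zero =>
      exfalso
      simp only [Nat.zero_mul, Nat.le_zero] at hk
      have := Nat.mul_eq_zero.mp (by omega : (q + 1) * ws.length = 0)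
      omega
    | succ k =>
      simp only [List.replicate_succ, List.flatten_cons]
      rw [List.take_append]
      have h1 : ws.length ≤ (q + 1) * ws.length + r := by
        calc ws.length ≤ (q + 1) * ws.length := Nat.le_mul_of_pos_left _ (by omega)
        _ ≤ (q + 1) * ws.length + r := by omega
      rw [List.take_of_length_le h1]
      have h2 : (q + 1) * ws.length + r - ws.length = q * ws.length + r := by
        have : (q + 1) * ws.length = q * ws.length + ws.length := by ring
        omega
      rw [h2, ih k (by have h3 : (q+1) * ws.length = q * ws.length + ws.length := by ring
                       have h4 : (k+1) * ws.length = k * ws.length + ws.length := by ring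
                       omega)]
      simp [List.append_assoc]

-- ===== VERDICT (by name: the statement is the Claim_ definition above) =====
theorem repeat_to_words_py_spec : Claim_equal_repeat_to_words_py := by
  intro text t _
  unfold Spec_repeat_to_words_py repeat_to_words_py repeat_to_words_py_alt
  by_cases hw : PySem.Str.split₀ text = []
  · simp [hw]
  · simp only [hw, dif_neg, if_neg, not_false_iff]
    set ws := PySem.Str.split₀ text with hws
    have hL : 0 < ws.length := List.length_pos_of_ne_nil hw
    by_cases ht : t ≤ 0
    · simp only [ht, if_pos]
      rw [pvALoop]
      have hc : ¬ ((([] : List String).length : Int) < t) := by simp; omega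
      simp only [hc, if_neg, not_false_iff]
      simp [PySem.List.slice, PySem.Str.join]
    · simp only [ht, if_neg, not_false_iff]
      have ht' : 0 < t := by omega
      -- A side
      rw [pvALoop_eq ws hw t (t - ([] : List String).length).toNat [] (le_refl _)]
      simp only [List.nil_append, List.length_nil, Nat.cast_zero, sub_zero]
      rw [PySem.List.slice_to _ (by omega)]
      set n := t.toNat with hn
      have hKval : pvIters ws.length t = (n + ws.length - 1) / ws.length := by
        unfold pvIters; rw [if_neg (by omega : ¬ t ≤ 0)]
      have hnK : n ≤ pvIters ws.length t * ws.length := by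
        rw [hKval]
        have h1 := Nat.div_add_mod' (n + ws.length - 1) ws.length
        have h2 : (n + ws.length - 1) % ws.length < ws.length := Nat.mod_lt _ hL
        omega
      have hdm := Nat.div_add_mod' n ws.length
      have hmod : n % ws.length < ws.length := Nat.mod_lt _ hL
      have hrw : n = (n / ws.length) * ws.length + n % ws.length := by omega
      rw [hrw]
      rw [pvTake_flatten_replicate ws (n / ws.length) (n % ws.length) hmod (pvIters ws.length t) (by omega)]
      -- B side
      have hfull : PySem.Int.floordiv t (ws.length : Int) = ((n / ws.length : Nat) : Int) := by
        rw [PySem.Int.floordiv_eq_ediv_of_pos (by exact_mod_cast hL)]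
        have hteq : t = ((n : Nat) : Int) := by omega
        rw [hteq]; push_cast; ring
      have hrem : PySem.Int.mod t (ws.length : Int) = ((n % ws.length : Nat) : Int) := by
        rw [PySem.Int.mod_eq_emod_of_pos (by exact_mod_cast hL)]
        have hteq : t = ((n : Nat) : Int) := by omega
        rw [hteq]; push_cast; ring
      rw [hfull, hrem, PySem.List.slice_to _ (by positivity)]
      simp only [Int.toNat_natCast]
      rw [← hws]
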